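-- pv_equiv track=rewrite | github.com/MzGrisotti/TCC | eBPF/Helper_Functions.py | hex_to_ip
-- ===== SOURCE A (Python) =====
-- def hex_to_ip(ip):
--     ip_ = str(hex(int(ip)))
--     ip_ = ip_[2:]
--     l = []
--     while(len(ip_)!= 0):
--         byte = ip_[-2:]
--         ip_ = ip_[:-2]
--         l.insert(0,int(byte, 16))
--
--     ip = '.'.join(map(str, l))
--     return ip
-- ===== SOURCE B (Python) =====
-- def hex_to_ip(ip):
--     n = int(ip)
--     if n == 0:
--         return '0'
--     parts = []
--     while n > 0:
--         parts.append(str(n % 256))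
--         n //= 256
--     return '.'.join(reversed(parts))
-- ===== Notes on version B (the rewrite author's own statement) =====
-- stated objective: idiomatic
-- what changed: B extracts bytes by integer arithmetic (n % 256, n //= 256) instead of formatting the number as a hex string and repeatedly slicing/re-parsing two-character chunks with int(byte, 16).
-- outside the precondition, e.g. on hex_to_ip(-5): A raises ValueError, B returns ''
import Mathlib
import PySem

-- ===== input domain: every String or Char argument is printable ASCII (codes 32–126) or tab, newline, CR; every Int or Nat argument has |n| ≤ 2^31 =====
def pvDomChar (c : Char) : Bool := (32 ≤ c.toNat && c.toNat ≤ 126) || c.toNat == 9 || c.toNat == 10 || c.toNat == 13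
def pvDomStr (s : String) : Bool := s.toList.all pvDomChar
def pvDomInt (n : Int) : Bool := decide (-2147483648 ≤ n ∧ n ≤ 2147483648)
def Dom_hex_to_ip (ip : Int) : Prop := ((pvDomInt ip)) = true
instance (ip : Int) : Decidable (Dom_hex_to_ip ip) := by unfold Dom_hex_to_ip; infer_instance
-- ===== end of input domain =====

-- B replaces A's hex-string formatting + two-char slicing + int(byte,16) re-parsing by plain
-- byte arithmetic (n % 256, n //= 256); return values proved equal for all ip ≥ 0.

-- ===== PORT A =====
-- hex digits of a natural number, most significant first, lowercase, "0" for 0 (= Python hex(n) without the "0x")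
def pyHexChars (n : Nat) : List Char :=
  if _h : n < 16 then [Nat.digitChar n]
  else pyHexChars (n / 16) ++ [Nat.digitChar (n % 16)]
  termination_by n
  decreasing_by exact Nat.div_lt_self (by omega) (by omega)

-- while len(ip_) != 0: byte = ip_[-2:]; ip_ = ip_[:-2]; l.insert(0, int(byte, 16))
-- int(byte, 16) raises ValueError exactly when ip < 0 (byte then contains 'x' or '-'); Pre_ excludes that, so .getD 0 is never taken on admitted inputs
def hexToIpLoopA (cs : List Char) (l : List Int) : List Int :=
  if _h : cs.length = 0 then l
  else
    hexToIpLoopA (PySem.List.slice cs none (some (-2)))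
      (PySem.List.insert l 0 ((PySem.Int.ofStrBase? (String.ofList (PySem.List.slice cs (some (-2)) none)) 16).getD 0))
  termination_by cs.length
  decreasing_by
    rw [PySem.List.slice_to_neg_ofNat cs 2 (by omega)]
    simp [List.length_take]; omega

-- ip_ = str(hex(int(ip)))[2:]; l = the loop's result; return '.'.join(map(str, l))
def hex_to_ip (ip : Int) : String :=
  PySem.Str.join "."
    ((hexToIpLoopA
        (PySem.List.slice
          (if ip < 0 then '-' :: '0' :: 'x' :: pyHexChars (-ip).toNat
           else '0' :: 'x' :: pyHexChars ip.toNat)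
          (some 2) none)
        []).map PySem.Int.toStr)

-- ===== PORT B =====
-- while n > 0: parts.append(str(n % 256)); n //= 256   (for n < 0 the Python loop body never runs)
def hexToIpLoopB (n : Int) (parts : List String) : List String :=
  if _h : 0 < n then
    hexToIpLoopB (PySem.Int.floordiv n 256) (parts ++ [PySem.Int.toStr (PySem.Int.mod n 256)])
  else parts
  termination_by n.toNat
  decreasing_by simp [pysem]; omega

def hex_to_ip_alt (ip : Int) : String :=
  if ip = 0 then "0"
  else PySem.Str.join "." (hexToIpLoopB ip []).reverse

-- ===== PRECONDITION & SPEC =====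
-- Pre_ excludes ip < 0, where A raises ValueError (int(byte, 16) on a chunk of '-0x…' containing 'x' or '-').
def Pre_hex_to_ip (ip : Int) : Prop := 0 ≤ ip
instance (ip : Int) : Decidable (Pre_hex_to_ip ip) := by unfold Pre_hex_to_ip; infer_instance
def pvWitness_hex_to_ip : Int := (16909060)
def Spec_hex_to_ip (ip : Int) (out : String) : Prop := out = hex_to_ip_alt ip
instance (ip : Int) (out : String) : Decidable (Spec_hex_to_ip ip out) := by unfold Spec_hex_to_ip; infer_instance

-- ===== CLAIM (what is proved, stated in full; the proofs are below) =====
def Claim_equal_hex_to_ip : Prop := ∀ (ip : Int), Dom_hex_to_ip ip → Pre_hex_to_ip ip → Spec_hex_to_ip ip (hex_to_ip ip)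

-- ===== LEMMAS AND PROOFS =====

-- canonical base-256 digits, most significant first
def bytesN (n : Nat) : List Nat :=
  if h : n < 256 then [n]
  else bytesN (n / 256) ++ [n % 256]
  termination_by n
  decreasing_by exact Nat.div_lt_self (by omega) (by omega)

theorem parse1 (d : Nat) (hd : d < 16) :
    PySem.Int.ofCharsBase? [Nat.digitChar d] 16 = some (d : Int) := by
  interval_cases d <;> decide

theorem parse2 (a b : Nat) (ha : a < 16) (hb : b < 16) :
    PySem.Int.ofCharsBase? [Nat.digitChar a, Nat.digitChar b] 16 = some ((16 * a + b : Nat) : Int) := by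
  interval_cases a <;> interval_cases b <;> decide

theorem loopA_nil (l : List Int) : hexToIpLoopA [] l = l := by
  rw [hexToIpLoopA]; simp

theorem loopA_eq (n : Nat) : ∀ acc, hexToIpLoopA (pyHexChars n) acc = (bytesN n).map (fun b => (b : Int)) ++ acc := by
  induction n using Nat.strong_induction_on with
  | _ n ih =>
    intro acc
    by_cases h16 : n < 16
    · rw [pyHexChars, dif_pos h16, hexToIpLoopA]
      rw [dif_neg (by simp)]
      rw [PySem.List.slice_from_neg_ofNat _ 2 (by omega), PySem.List.slice_to_neg_ofNat _ 2 (by omega)]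
      simp only [List.length_cons, List.length_nil]
      norm_num
      rw [loopA_nil]
      rw [parse1 n h16]
      rw [bytesN, dif_pos (by omega)]
      simp [PySem.List.insert_zero]
    · by_cases h256 : n < 256
      · have hd : n / 16 < 16 := by omega
        rw [pyHexChars, dif_neg h16, pyHexChars, dif_pos hd]
        rw [hexToIpLoopA, dif_neg (by simp)]
        rw [PySem.List.slice_from_neg_ofNat _ 2 (by omega), PySem.List.slice_to_neg_ofNat _ 2 (by omega)]
        simp only [List.length_cons, List.length_nil, List.singleton_append]
        norm_num
        rw [loopA_nil]
        rw [parse2 _ _ hd (by omega)]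
        have : 16 * (n / 16) + n % 16 = n := by omega
        rw [this, bytesN, dif_pos h256]
        simp [PySem.List.insert_zero]
      · -- n ≥ 256 : pyHexChars n = pyHexChars (n/256) ++ [digit ((n/16)%16), digit (n%16)]
        have hsplit : pyHexChars n = pyHexChars (n / 256) ++ [Nat.digitChar (n / 16 % 16), Nat.digitChar (n % 16)] := by
          rw [pyHexChars, dif_neg h16, pyHexChars, dif_neg (by omega)]
          have : n / 16 / 16 = n / 256 := by omega
          rw [this]
          simp
        rw [hsplit]
        have hlen : (pyHexChars (n / 256) ++ [Nat.digitChar (n / 16 % 16), Nat.digitChar (n % 16)]).length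
            = (pyHexChars (n / 256)).length + 2 := by simp
        rw [hexToIpLoopA, dif_neg (by simp)]
        rw [PySem.List.slice_from_neg_ofNat _ 2 (by omega), PySem.List.slice_to_neg_ofNat _ 2 (by omega)]
        rw [hlen]
        have h1 : (pyHexChars (n / 256)).length + 2 - 2 = (pyHexChars (n / 256)).length := by omega
        rw [h1, List.drop_left, List.take_left]
        simp only [PySem.Int.ofStrBase?_ofList]
        rw [parse2 _ _ (by omega) (by omega)]
        have hmod : 16 * (n / 16 % 16) + n % 16 = n % 256 := by omega
        rw [hmod, PySem.List.insert_zero]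
        rw [ih (n / 256) (by omega)]
        conv_rhs => rw [bytesN]
        rw [dif_neg h256]
        simp

theorem loopB_eq (n : Nat) (hn : 0 < n) : ∀ parts, hexToIpLoopB (n : Int) parts = parts ++ ((bytesN n).reverse.map (fun b => PySem.Int.toStr (b : Int))) := by
  induction n using Nat.strong_induction_on with
  | _ n ih =>
    intro parts
    rw [hexToIpLoopB, dif_pos (by exact_mod_cast hn)]
    have hfd : PySem.Int.floordiv (n : Int) 256 = ((n / 256 : Nat) : Int) := by
      simp [pysem]
    have hmd : PySem.Int.mod (n : Int) 256 = ((n % 256 : Nat) : Int) := by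
      simp [pysem]
    rw [hfd, hmd]
    by_cases h256 : n < 256
    · have : n / 256 = 0 := by omega
      rw [this]
      rw [hexToIpLoopB, dif_neg (by norm_num)]
      rw [bytesN, dif_pos h256]
      have : n % 256 = n := by omega
      simp [this]
    · rw [ih (n / 256) (by omega) (by omega)]
      conv_rhs => rw [bytesN]
      rw [dif_neg h256]
      simp

-- ===== VERDICT (by name: the statement is the Claim_ definition above) =====
theorem hex_to_ip_spec : Claim_equal_hex_to_ip := by
  intro ip _ hpre
  unfold Pre_hex_to_ip at hpre
  unfold Spec_hex_to_ip hex_to_ip hex_to_ip_alt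
  have hip : ip = ((ip.toNat : Nat) : Int) := by omega
  rw [if_neg (by omega)]
  rw [show PySem.List.slice ('0' :: 'x' :: pyHexChars ip.toNat) (some 2) none = pyHexChars ip.toNat from by
    simp [pysem]]
  rw [loopA_eq]
  by_cases h0 : ip = 0
  · subst h0
    rw [if_pos rfl, show ((0:Int).toNat) = 0 from rfl, bytesN]
    rfl
  · rw [if_neg h0]
    rw [hip, loopB_eq ip.toNat (by omega)]
    simp
    rw [show max ip 0 = ip from by omega]
    simp [List.flatMap_reverse, Function.comp_def]
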